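-- pv_equiv track=rewrite | github.com/Diogofranciulli/pythonatt | dia17/cp.py | compras
-- ===== SOURCE A (Python) =====
-- def compras(lista_de_compras,supermercado):
--     valor = 0
--     tem = []
--     ntem = []
--     for i in lista_de_compras:
--         if i in supermercado:
--             valor += supermercado[i]
--             tem.append(i)
--         else:
--             ntem.append(i)
--     return valor, tem, ntem
-- ===== SOURCE B (Python) =====
-- def compras(lista_de_compras, supermercado):
--     # Multiplicity counter over the shopping list; the total is computed by
--     # traversing the CATALOGUE once, weighting each price by how many times
--     # its item was requested.
--     cnt = {}
--     for i in lista_de_compras: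
--         cnt[i] = cnt.get(i, 0) + 1
--     valor = sum(p * cnt.get(k, 0) for k, p in supermercado.items())
--     tem = [i for i in lista_de_compras if i in supermercado]
--     ntem = [i for i in lista_de_compras if i not in supermercado]
--     return valor, tem, ntem
-- ===== Notes on version B (the rewrite author's own statement) =====
-- stated objective: alternative
-- what changed: Instead of accumulating prices while scanning the shopping list, B builds a multiplicity counter of the list and computes the total by a pass over the supermarket catalogue (price times requested count), with the two availability partitions produced by separate membership filters.
import Mathlib
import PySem

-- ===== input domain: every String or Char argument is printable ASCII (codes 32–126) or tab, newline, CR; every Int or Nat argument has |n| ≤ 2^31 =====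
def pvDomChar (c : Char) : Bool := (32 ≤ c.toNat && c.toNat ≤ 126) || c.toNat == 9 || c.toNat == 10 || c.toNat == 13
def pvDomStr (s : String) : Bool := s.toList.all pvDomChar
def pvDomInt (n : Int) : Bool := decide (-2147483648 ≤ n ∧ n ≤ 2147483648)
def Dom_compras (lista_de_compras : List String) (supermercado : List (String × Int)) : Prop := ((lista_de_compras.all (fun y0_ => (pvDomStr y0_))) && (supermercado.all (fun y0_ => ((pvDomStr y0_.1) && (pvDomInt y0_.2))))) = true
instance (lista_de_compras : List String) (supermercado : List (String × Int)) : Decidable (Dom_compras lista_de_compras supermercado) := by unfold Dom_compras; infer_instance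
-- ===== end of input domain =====

-- B replaces A's accumulating price sum over the list by a multiplicity counter
-- of the list plus one pass over the catalogue (price * count); objective: alternative.

-- ===== PORT A =====
-- A: one loop accumulating (valor, tem, ntem); 'i in supermercado' / 'supermercado[i]'
-- are dict membership/lookup, ported via PySem.Dict over the association list.
def compras (lista_de_compras : List String) (supermercado : List (String × Int)) : Int × List String × List String :=
  let d : PySem.Dict String Int := PySem.Dict.mk supermercado
  lista_de_compras.foldl
    (fun (st : Int × List String × List String) i =>
      match d.get? i with
      | some p => (st.1 + p, st.2.1 ++ [i], st.2.2)
      | none   => (st.1, st.2.1, st.2.2 ++ [i]))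
    (0, [], [])

-- ===== PORT B =====
-- B: counter loop (cnt[i] = cnt.get(i,0)+1), then sum over supermercado.items()
-- of p * cnt.get(k, 0), then two membership filters.
def compras_alt (lista_de_compras : List String) (supermercado : List (String × Int)) : Int × List String × List String :=
  let d : PySem.Dict String Int := PySem.Dict.mk supermercado
  let cnt : PySem.Dict String Int :=
    lista_de_compras.foldl (fun c i => c.insert i (c.getD i 0 + 1)) PySem.Dict.empty
  let valor := (d.items.map (fun kp => kp.2 * cnt.getD kp.1 0)).sum
  let tem := lista_de_compras.filter (fun i => d.contains i)
  let ntem := lista_de_compras.filter (fun i => !(d.contains i))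
  (valor, tem, ntem)

-- ===== PRECONDITION & SPEC =====
-- 'supermercado' is a Python dict, so its association list has distinct keys;
-- Pre_ states exactly that (it excludes no input a Python call can present).
def Pre_compras (lista_de_compras : List String) (supermercado : List (String × Int)) : Prop :=
  (supermercado.map Prod.fst).Nodup
instance (lista_de_compras : List String) (supermercado : List (String × Int)) : Decidable (Pre_compras lista_de_compras supermercado) := by unfold Pre_compras; infer_instance
def pvWitness_compras : List String × (List (String × Int)) := (["pao", "uva", "pao"], [("pao", 3), ("uva", 7)])
def Spec_compras (lista_de_compras : List String) (supermercado : List (String × Int)) (out : Int × List String × List String) : Prop := out = compras_alt lista_de_compras supermercado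
instance (lista_de_compras : List String) (supermercado : List (String × Int)) (out : Int × List String × List String) : Decidable (Spec_compras lista_de_compras supermercado out) := by unfold Spec_compras; infer_instance

-- ===== CLAIM (what is proved, stated in full; the proofs are below) =====
def Claim_equal_compras : Prop := ∀ (lista_de_compras : List String) (supermercado : List (String × Int)), Dom_compras lista_de_compras supermercado → Pre_compras lista_de_compras supermercado → Spec_compras lista_de_compras supermercado (compras lista_de_compras supermercado)

-- ===== LEMMAS AND PROOFS =====
-- sum over a NODUP key list of a one-hot: picks out x's value (or 0).
theorem sum_one_hot (ks : List String) (hnd : ks.Nodup) (f : String → Int) (x : String) :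
    (ks.map (fun k => if k = x then f k else 0)).sum
      = if x ∈ ks then f x else 0 := by
  induction ks with
  | nil => simp
  | cons y ys ih =>
    simp only [List.nodup_cons] at hnd
    by_cases hy : y = x
    · subst hy
      simp [List.sum_cons, ih hnd.2, hnd.1]
    · simp [List.sum_cons, hy, ih hnd.2, Ne.symm hy]

-- B's catalogue-side sum equals A's list-side sum of looked-up prices.
theorem catalogue_sum_eq (d : PySem.Dict String Int) (hnd : d.keys.Nodup) (l : List String) :
    (d.items.map (fun kp => kp.2 * (l.count kp.1 : Int))).sum
      = ((l.filter (fun i => d.contains i)).map (fun i => d.getD i 0)).sum := by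
  induction l with
  | nil => simp
  | cons x xs ih =>
    have hstep : ∀ kp : String × Int,
        kp.2 * ((x :: xs).count kp.1 : Int)
          = kp.2 * ((xs.count kp.1 : Int)) + (if kp.1 = x then kp.2 else 0) := by
      intro kp
      by_cases h : kp.1 = x
      · simp [List.count_cons, h]; ring
      · simp [List.count_cons, h]
        exact Or.inl (Ne.symm h)
    have hsplit : (d.items.map (fun kp => kp.2 * ((x :: xs).count kp.1 : Int))).sum
        = (d.items.map (fun kp => kp.2 * (xs.count kp.1 : Int))).sum
          + (d.items.map (fun kp => if kp.1 = x then kp.2 else 0)).sum := by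
      rw [← List.sum_map_add]
      exact congrArg List.sum (List.map_congr_left (fun kp _ => hstep kp))
    have hitems : d.items = d.keys.map (fun k => (k, d.getD k 0)) :=
      PySem.Dict.items_eq_map_keys d hnd 0
    have hone : (d.items.map (fun kp => if kp.1 = x then kp.2 else 0)).sum
        = if d.contains x then d.getD x 0 else 0 := by
      rw [hitems, List.map_map]
      have : ((fun kp : String × Int => if kp.1 = x then kp.2 else 0) ∘
          (fun k => (k, d.getD k 0))) = fun k => if k = x then d.getD k 0 else 0 := rfl
      rw [this, sum_one_hot d.keys hnd (fun k => d.getD k 0) x,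
        PySem.Dict.contains_eq_decide_mem_keys]
      by_cases hx : x ∈ d.keys <;> simp [hx]
    by_cases hx : d.contains x
    · simp only [List.filter_cons, hx, hsplit, hone, ih, if_true, List.map_cons,
        List.sum_cons]
      ring
    · simp only [List.filter_cons, hx, hsplit, hone, ih]
      simp

-- A's fused loop, characterised in B's staged shape.
theorem compras_foldl_eq (d : PySem.Dict String Int) (l : List String)
    (v : Int) (t nt : List String) :
    l.foldl
      (fun (st : Int × List String × List String) i =>
        match d.get? i with
        | some p => (st.1 + p, st.2.1 ++ [i], st.2.2)
        | none   => (st.1, st.2.1, st.2.2 ++ [i]))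
      (v, t, nt)
    = (v + ((l.filter (fun i => d.contains i)).map (fun i => d.getD i 0)).sum,
       t ++ l.filter (fun i => d.contains i),
       nt ++ l.filter (fun i => !(d.contains i))) := by
  induction l generalizing v t nt with
  | nil => simp
  | cons x xs ih =>
    have hc : d.contains x = (d.get? x).isSome := PySem.Dict.contains_eq_isSome_get? d x
    cases hx : d.get? x with
    | some p =>
      simp only [List.foldl_cons, hx, ih]
      have hgd : d.getD x 0 = p := PySem.Dict.getD_of_get?_eq_some d 0 hx
      simp [hc, hx, hgd]
      ring
    | none =>
      simp only [List.foldl_cons, hx, ih]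
      simp [hc, hx]

-- ===== VERDICT (by name: the statement is the Claim_ definition above) =====
theorem compras_spec : Claim_equal_compras := by
  intro l sm _ hpre
  unfold Spec_compras compras compras_alt
  have hnd : (PySem.Dict.mk sm).keys.Nodup := by
    simpa [PySem.Dict.keys] using hpre
  have hcnt : ∀ k, (l.foldl (fun c i => c.insert i (c.getD i 0 + 1))
      (PySem.Dict.empty : PySem.Dict String Int)).getD k 0 = (l.count k : Int) := by
    intro k
    rw [PySem.Dict.getD_foldl_insert_add_one]
    simp
  simp only [compras_foldl_eq, hcnt]
  rw [catalogue_sum_eq (PySem.Dict.mk sm) hnd l]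
  simp
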